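-- pv_equiv track=rewrite | github.com/Ye99/MyAgentSkills | folder-poi-itinerary-rename/scripts/rename_folder_with_poi_itinerary.py | _extract_string_values
-- ===== SOURCE A (Python) =====
-- from typing import Any
--
-- def _extract_string_values(payload: dict[str, Any], keys: list[str]) -> list[str]:
--     values: list[str] = []
--     for key in keys:
--         value = payload.get(key)
--         if isinstance(value, str):
--             stripped = value.strip()
--             if stripped:
--                 values.append(stripped)
--             continue
--         if isinstance(value, list):
--             for entry in value:
--                 if isinstance(entry, str) and entry.strip():
--                     values.append(entry.strip())
--     return values
-- ===== SOURCE B (Python) =====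
-- def _extract_string_values(payload, keys):
--     # Preprocess the payload ONCE into an index of already-cleaned string lists,
--     # then the answer is just the concatenation of the lookups for the keys.
--     cleaned = {}
--     for k, v in payload.items():
--         if isinstance(v, str):
--             s = v.strip()
--             cleaned[k] = [s] if s else []
--         elif isinstance(v, list):
--             cleaned[k] = [e.strip() for e in v if isinstance(e, str) and e.strip()]
--     out = []
--     for k in keys:
--         out += cleaned.get(k, [])
--     return out
-- ===== Notes on version B (the rewrite author's own statement) =====
-- stated objective: alternative
-- what changed: Instead of dispatching on each key's value inside the key loop, B preprocesses the whole payload once into an index mapping each key to its already-stripped non-empty strings, so the key loop becomes a plain concatenation of index lookups; strip/filter work is done once per payload entry rather than once per requested key.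
import Mathlib
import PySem

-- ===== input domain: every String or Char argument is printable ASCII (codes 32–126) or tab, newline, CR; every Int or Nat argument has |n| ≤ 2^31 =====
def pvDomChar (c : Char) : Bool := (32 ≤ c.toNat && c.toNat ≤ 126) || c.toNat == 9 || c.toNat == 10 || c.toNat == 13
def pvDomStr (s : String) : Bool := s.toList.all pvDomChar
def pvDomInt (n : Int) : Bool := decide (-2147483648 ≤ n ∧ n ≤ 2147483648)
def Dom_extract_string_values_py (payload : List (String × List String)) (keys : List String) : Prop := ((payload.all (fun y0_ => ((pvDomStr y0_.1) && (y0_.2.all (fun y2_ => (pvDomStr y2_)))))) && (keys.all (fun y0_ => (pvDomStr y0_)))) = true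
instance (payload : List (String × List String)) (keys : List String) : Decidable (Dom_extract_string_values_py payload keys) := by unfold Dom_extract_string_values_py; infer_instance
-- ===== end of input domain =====

-- B preprocesses the payload once into a cleaned index (stripped non-empty strings per key),
-- then concatenates index lookups for the keys, instead of A's per-key dispatch with nested
-- append loops (objective: alternative). In this model all dict values are lists of strings,
-- so the Python isinstance-str branches have no counterpart.

-- ===== PORT A =====
def extract_string_values_py (payload : List (String × List String)) (keys : List String) : List String :=
  keys.foldl (fun values key =>
    match payload.find? (fun p => p.1 == key) with
    | none => values
    | some (_, value) =>
        value.foldl (fun vs entry =>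
          if PySem.Str.strip entry ≠ "" then vs ++ [PySem.Str.strip entry] else vs) values) []

-- ===== PORT B =====
-- cleaned[k] = [e.strip() for e in v if e.strip()]  (filter on the entry, then strip it)
def extract_string_values_py_alt (payload : List (String × List String)) (keys : List String) : List String :=
  let cleaned : PySem.Dict String (List String) :=
    payload.foldl (fun d kv =>
      d.insert kv.1 ((kv.2.filter (fun e => PySem.Str.strip e ≠ "")).map PySem.Str.strip))
      PySem.Dict.empty
  keys.foldl (fun out k => out ++ cleaned.getD k []) []

-- ===== PRECONDITION & SPEC =====
-- Pre_ excludes association lists with duplicate keys: a Python dict cannot contain them, so on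
-- such model-only inputs A's first-match lookup vs B's overwriting index build is accidental.
def Pre_extract_string_values_py (payload : List (String × List String)) (keys : List String) : Prop :=
  (payload.map Prod.fst).Nodup
instance (payload : List (String × List String)) (keys : List String) : Decidable (Pre_extract_string_values_py payload keys) := by unfold Pre_extract_string_values_py; infer_instance

def pvWitness_extract_string_values_py : (List (String × List String)) × List String :=
  ([("a", ["  x ", " "]), ("b", ["y"])], ["b", "a", "c"])

def Spec_extract_string_values_py (payload : List (String × List String)) (keys : List String) (out : List String) : Prop := out = extract_string_values_py_alt payload keys
instance (payload : List (String × List String)) (keys : List String) (out : List String) : Decidable (Spec_extract_string_values_py payload keys out) := by unfold Spec_extract_string_values_py; infer_instance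

-- ===== CLAIM (what is proved, stated in full; the proofs are below) =====
def Claim_equal_extract_string_values_py : Prop := ∀ (payload : List (String × List String)) (keys : List String), Dom_extract_string_values_py payload keys → Pre_extract_string_values_py payload keys → Spec_extract_string_values_py payload keys (extract_string_values_py payload keys)

-- ===== LEMMAS AND PROOFS =====

-- cleaning of one list of entries
def pvClean (v : List String) : List String :=
  (v.filter (fun e => PySem.Str.strip e ≠ "")).map PySem.Str.strip

-- A's inner loop = accumulator ++ cleaned list
theorem inner_loop_eq (v : List String) (acc : List String) :
    v.foldl (fun vs entry =>
      if PySem.Str.strip entry ≠ "" then vs ++ [PySem.Str.strip entry] else vs) acc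
    = acc ++ pvClean v := by
  induction v generalizing acc with
  | nil => simp [pvClean]
  | cons e t ih =>
    rw [List.foldl_cons, ih]
    by_cases h : PySem.Str.strip e = "" <;> simp [pvClean, h]

-- first-match lookup in a literal dict of mapped items
theorem get?_mk_map (t : List (String × List String)) (k : String) :
    (PySem.Dict.mk (t.map (fun kv => (kv.1, pvClean kv.2)))).get? k
    = (t.find? (fun p => p.1 == k)).map (fun kv => pvClean kv.2) := by
  induction t with
  | nil => simp [PySem.Dict.get?]
  | cons p r ih =>
    simp only [List.map_cons, List.find?]
    rw [PySem.Dict.get?_mk_cons]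
    by_cases h : (p.1 == k) = true
    · simp [h]
    · simp only [h] at *; simp [ih]

-- B's index built over a duplicate-free payload answers by first match
theorem cleaned_getD_eq (payload : List (String × List String)) (k : String)
    (hnd : (payload.map Prod.fst).Nodup) :
    (payload.foldl (fun d kv => d.insert kv.1 (pvClean kv.2)) PySem.Dict.empty).getD k []
    = match payload.find? (fun p => p.1 == k) with
      | none => []
      | some (_, v) => pvClean v := by
  have hitems := PySem.Dict.items_foldl_insert_fresh payload Prod.fst (fun kv => pvClean kv.2)
      PySem.Dict.empty (by intro a _; simp) hnd
  have hd : (payload.foldl (fun d kv => d.insert kv.1 (pvClean kv.2)) PySem.Dict.empty)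
      = PySem.Dict.mk (payload.map (fun kv => (kv.1, pvClean kv.2))) := by
    apply PySem.Dict.ext
    simpa using hitems
  rw [hd, PySem.Dict.getD_eq_get?_getD, get?_mk_map]
  cases h : payload.find? (fun p => p.1 == k) <;> simp

-- A's outer loop = accumulator ++ B's result (both expressed over the first-match lookup)
theorem outer_loop_eq (payload : List (String × List String)) (keys : List String)
    (acc : List String) (hnd : (payload.map Prod.fst).Nodup) :
    keys.foldl (fun values key =>
      match payload.find? (fun p => p.1 == key) with
      | none => values
      | some (_, value) =>
          value.foldl (fun vs entry =>
            if PySem.Str.strip entry ≠ "" then vs ++ [PySem.Str.strip entry] else vs) values) acc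
    = acc ++ keys.foldl (fun out k =>
        out ++ (payload.foldl (fun d kv => d.insert kv.1 (pvClean kv.2)) PySem.Dict.empty).getD k []) [] := by
  induction keys generalizing acc with
  | nil => simp
  | cons k t ih =>
    rw [List.foldl_cons, List.foldl_cons]
    have hstep : (t.foldl (fun out k =>
        out ++ (payload.foldl (fun d kv => d.insert kv.1 (pvClean kv.2)) PySem.Dict.empty).getD k [])
        ([] ++ (payload.foldl (fun d kv => d.insert kv.1 (pvClean kv.2)) PySem.Dict.empty).getD k []))
        = (payload.foldl (fun d kv => d.insert kv.1 (pvClean kv.2)) PySem.Dict.empty).getD k []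
          ++ t.foldl (fun out k =>
            out ++ (payload.foldl (fun d kv => d.insert kv.1 (pvClean kv.2)) PySem.Dict.empty).getD k []) [] := by
      simpa using (PySem.foldl_append_eq_flatMap t
        (fun k => (payload.foldl (fun d kv => d.insert kv.1 (pvClean kv.2)) PySem.Dict.empty).getD k []))
    rw [cleaned_getD_eq payload k hnd] at hstep ⊢
    cases h : payload.find? (fun p => p.1 == k) with
    | none => simp only [h] at hstep ⊢; rw [ih acc, hstep]; simp
    | some pr =>
      obtain ⟨a, b⟩ := pr
      simp only [h] at hstep ⊢
      rw [inner_loop_eq, ih (acc ++ pvClean b), hstep, List.append_assoc]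

-- ===== VERDICT (by name: the statement is the Claim_ definition above) =====
theorem extract_string_values_py_spec : Claim_equal_extract_string_values_py := by
  intro payload keys _ hpre
  unfold Spec_extract_string_values_py extract_string_values_py extract_string_values_py_alt
  simpa [pvClean] using outer_loop_eq payload keys [] hpre
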